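-- pv_equiv track=rewrite | github.com/Satyajit-2003/Daily_DSA | leetcode-75/443-string-compression.py | compress
-- ===== SOURCE A (Python) =====
-- from typing import List
--
-- def compress(chars: List[str]) -> int:
--     if len(chars) == 1:
--         return 1
--     i = 0
--     while i < len(chars):
--         count = 1
--         while i < len(chars) - 1 and chars[i] == chars[i + 1]:
--             count += 1
--             chars.pop(i + 1)
--         if count > 1:
--             for j in str(count):
--                 chars.insert(i + 1, j)
--                 i += 1
--         i += 1
--     return len(chars)
-- ===== SOURCE B (Python) =====
-- from typing import List
--
-- def compress(chars: List[str]) -> int: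
--     n = len(chars)
--     read = 0
--     write = 0
--     while read < n:
--         ch = chars[read]
--         start = read
--         while read < n and chars[read] == ch:
--             read += 1
--         chars[write] = ch
--         write += 1
--         cnt = read - start
--         if cnt > 1:
--             for d in str(cnt):
--                 chars[write] = d
--                 write += 1
--     del chars[write:]
--     return write
-- ===== Notes on version B (the rewrite author's own statement) =====
-- stated objective: faster
-- what changed: Replaces A's O(n^2) in-place pop/insert rewriting (each pop/insert shifts the tail) with the classic single-pass two-pointer read/write compression that overwrites the prefix and truncates once.
import Mathlib
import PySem

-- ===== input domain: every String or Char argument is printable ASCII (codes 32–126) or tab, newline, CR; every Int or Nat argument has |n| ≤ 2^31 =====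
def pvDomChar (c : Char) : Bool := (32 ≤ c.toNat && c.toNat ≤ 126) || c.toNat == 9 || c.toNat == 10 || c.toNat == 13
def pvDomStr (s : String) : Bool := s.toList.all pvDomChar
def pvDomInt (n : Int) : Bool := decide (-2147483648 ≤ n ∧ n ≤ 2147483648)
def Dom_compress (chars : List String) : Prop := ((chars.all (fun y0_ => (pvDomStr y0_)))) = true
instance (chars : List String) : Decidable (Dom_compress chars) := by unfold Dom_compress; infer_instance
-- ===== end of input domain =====

-- B replaces A's quadratic in-place pop/insert rewriting by a single two-pointer pass; both
-- Pythons mutate `chars` into the same compressed list, and the equivalence proved here is about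
-- the RETURNED length. A's loop index i is always ≥ 0, so it is ported as a Nat; each while-loop
-- is structural recursion on a fuel bound that provably exceeds its iteration count (a totality
-- guard only: the guards and state transitions are the Python's).

-- ===== PORT A =====
-- inner `while i < len(chars)-1 and chars[i] == chars[i+1]: count += 1; chars.pop(i+1)`
-- (chars.pop(i+1) is exact as take (i+1) ++ drop (i+2): under the guard the index is in range;
--  the loop pops at most len(chars) times, so fuel = len(chars) at entry never runs out)
def compressRun : Nat → List String → Nat → Int → List String × Int
  | 0, chars, _, count => (chars, count)
  | fuel + 1, chars, i, count =>
    if i + 1 < chars.length ∧ chars[i]? = chars[i + 1]? then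
      compressRun fuel (chars.take (i + 1) ++ chars.drop (i + 2)) i (count + 1)
    else (chars, count)

-- `for j in str(count): chars.insert(i+1, j); i += 1` (the insert index is always ≤ len, so insertIdx is exact)
def insertDigits (chars : List String) (i : Nat) : List Char → List String × Nat
  | [] => (chars, i)
  | d :: ds => insertDigits (chars.insertIdx (i + 1) (String.ofList [d])) (i + 1) ds

-- outer `while i < len(chars): …` (one run is consumed per iteration, so it iterates at most
-- len(chars) times: fuel = len(chars) at entry never runs out)
def compressLoop : Nat → List String → Nat → List String
  | 0, chars, _ => chars
  | fuel + 1, chars, i =>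
    if i < chars.length then
      let r := compressRun chars.length chars i 1
      if 1 < r.2 then
        let p := insertDigits r.1 i (PySem.Int.toStr r.2).toList
        compressLoop fuel p.1 (p.2 + 1)
      else
        compressLoop fuel r.1 (i + 1)
    else chars

def compress (chars : List String) : Int :=
  if chars.length = 1 then 1
  else ((compressLoop chars.length chars 0).length : Int)

-- ===== PORT B =====
-- inner `while read < n and chars[read] == ch: read += 1` (at most len(chars) steps)
def altRun : Nat → List String → String → Nat → Nat
  | 0, _, _, read => read
  | fuel + 1, chars, ch, read =>
    if read < chars.length ∧ chars[read]? = some ch then altRun fuel chars ch (read + 1)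
    else read

-- outer loop of B: ch = chars[read]; scan past the run; write 1 slot for ch plus one per digit
-- of the count (read strictly advances each iteration, so fuel = len(chars) never runs out)
def altLoop : Nat → List String → Nat → Nat → Nat
  | 0, _, _, write => write
  | fuel + 1, chars, read, write =>
    if read < chars.length then
      match chars[read]? with
      | some ch =>
        -- read' = altRun …, write' = write + 1, cnt = read' - read (Source B's locals, inlined)
        altLoop fuel chars (altRun chars.length chars ch read)
          (if 1 < altRun chars.length chars ch read - read then
            (PySem.Int.toStr ((altRun chars.length chars ch read - read : Nat) : Int)).toList.foldl
              (fun w _ => w + 1) (write + 1)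
          else write + 1)
      | none => write   -- unreachable: read < length
    else write

def compress_alt (chars : List String) : Int :=
  ((altLoop chars.length chars 0 0 : Nat) : Int)

-- ===== PRECONDITION & SPEC =====
def Spec_compress (chars : List String) (out : Int) : Prop := out = compress_alt chars
instance (chars : List String) (out : Int) : Decidable (Spec_compress chars out) := by unfold Spec_compress; infer_instance

-- ===== CLAIM (what is proved, stated in full; the proofs are below) =====
def Claim_equal_compress : Prop := ∀ (chars : List String), Dom_compress chars → Spec_compress chars (compress chars)

-- ===== LEMMAS AND PROOFS =====

-- length of the maximal leading run of c in a list
def runLen (c : String) : List String → Nat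
  | [] => 0
  | x :: t => if x = c then 1 + runLen c t else 0

def digitsLen (k : Nat) : Nat := (PySem.Int.toStr (k : Int)).toList.length

-- the run-length-encoded size of a list: the common value both loops compute
def encode : List String → Nat
  | [] => 0
  | c :: t =>
      (1 + (if 0 < runLen c t then digitsLen (1 + runLen c t) else 0)) +
        encode (t.drop (runLen c t))
termination_by l => l.length
decreasing_by simp

theorem encode_nil : encode [] = 0 := by unfold encode; rfl

theorem encode_cons (c : String) (t : List String) :
    encode (c :: t)
      = (1 + (if 0 < runLen c t then digitsLen (1 + runLen c t) else 0)) +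
          encode (t.drop (runLen c t)) := by conv_lhs => rw [encode]

theorem runLen_le (c : String) : ∀ t : List String, runLen c t ≤ t.length := by
  intro t
  induction t with
  | nil => simp [runLen]
  | cons x t ih => simp only [runLen, List.length_cons]; split <;> omega

-- ===== A-side characterisation =====

theorem compressRun_eq (done : List String) (c : String) : ∀ (t : List String) (fuel : Nat) (cnt : Int),
    runLen c t ≤ fuel →
    compressRun fuel (done ++ c :: t) done.length cnt
      = (done ++ c :: t.drop (runLen c t), cnt + (runLen c t : Int)) := by
  intro t
  induction t with
  | nil =>
    intro fuel cnt _
    cases fuel with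
    | zero => simp [compressRun, runLen]
    | succ f =>
      rw [compressRun]
      rw [if_neg (by simp)]
      simp [runLen]
  | cons x t ih =>
    intro fuel cnt h
    by_cases hx : x = c
    · subst hx
      have hrl : runLen x (x :: t) = 1 + runLen x t := by simp [runLen]
      cases fuel with
      | zero => rw [hrl] at h; omega
      | succ f =>
        rw [compressRun, if_pos ?_]
        · have htake : (done ++ x :: x :: t).take (done.length + 1) = done ++ [x] := by
            rw [List.take_append]
            have h1 : (done.take (done.length + 1)) = done := List.take_of_length_le (by omega)
            have h2 : done.length + 1 - done.length = 1 := by omega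
            rw [h1, h2]
            rfl
          have hdrop : (done ++ x :: x :: t).drop (done.length + 2) = t := by
            rw [List.drop_append]
            have h1 : (done.drop (done.length + 2)) = [] := List.drop_eq_nil_of_le (by omega)
            have h2 : done.length + 2 - done.length = 2 := by omega
            rw [h1, h2]
            rfl
          rw [htake, hdrop]
          have hrec := ih f (cnt + 1) (by rw [hrl] at h; omega)
          simp only [List.append_assoc, List.cons_append, List.nil_append] at hrec ⊢
          rw [hrec]
          rw [hrl, Nat.add_comm 1 (runLen x t), List.drop_succ_cons]
          have hc2 : cnt + 1 + ((runLen x t : Nat) : Int) = cnt + ((runLen x t + 1 : Nat) : Int) := by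
            push_cast; ring
          rw [hc2]
        · constructor
          · simp
          · have h1 : (done ++ x :: x :: t)[done.length]? = some x := by
              rw [List.getElem?_append_right (le_refl _)]
              simp
            have h2 : (done ++ x :: x :: t)[done.length + 1]? = some x := by
              rw [List.getElem?_append_right (by omega)]
              simp
            rw [h1, h2]
    · cases fuel with
      | zero => simp [compressRun, runLen, hx]
      | succ f =>
        rw [compressRun, if_neg ?_]
        · simp [runLen, hx]
        · intro hcon
          rcases hcon with ⟨_, h2⟩
          have ha : (done ++ c :: x :: t)[done.length]? = some c := by
            rw [List.getElem?_append_right (le_refl _)]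
            simp
          have hb : (done ++ c :: x :: t)[done.length + 1]? = some x := by
            rw [List.getElem?_append_right (by omega)]
            simp
          rw [ha, hb] at h2
          exact hx (Option.some.inj h2).symm

theorem insertIdx_at_append (pre rt : List String) (x : String) :
    (pre ++ rt).insertIdx pre.length x = pre ++ x :: rt := by
  induction pre with
  | nil => simp
  | cons a pre ih => simp [List.insertIdx_succ_cons, ih]

theorem insertDigits_eq : ∀ (ds : List Char) (pre rt : List String) (i : Nat), pre.length = i + 1 →
    insertDigits (pre ++ rt) i ds
      = (pre ++ ds.map (fun d => String.ofList [d]) ++ rt, i + ds.length) := by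
  intro ds
  induction ds with
  | nil => intro pre rt i h; simp [insertDigits]
  | cons d ds ih =>
    intro pre rt i h
    have hins : (pre ++ rt).insertIdx (i + 1) (String.ofList [d]) = pre ++ String.ofList [d] :: rt := by
      rw [← h, insertIdx_at_append]
    simp only [insertDigits, hins]
    have hrec := ih (pre ++ [String.ofList [d]]) rt (i + 1) (by simp [h])
    simp only [List.append_assoc, List.cons_append, List.nil_append] at hrec
    rw [hrec]
    simp
    omega

theorem compressLoop_encode : ∀ (fuel : Nat) (rest done : List String), rest.length ≤ fuel →
    (compressLoop fuel (done ++ rest) done.length).length = done.length + encode rest := by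
  intro fuel
  induction fuel with
  | zero =>
    intro rest done h
    have : rest = [] := List.length_eq_zero_iff.mp (by omega)
    subst this
    simp [compressLoop, encode_nil]
  | succ f ih =>
    intro rest done h
    cases rest with
    | nil =>
      rw [compressLoop, if_neg (by simp)]
      simp [encode_nil]
    | cons c t =>
      rw [compressLoop, if_pos (by simp)]
      have hrun := compressRun_eq done c t (done ++ c :: t).length 1
        (by
          have := runLen_le c t
          simp
          omega)
      set R := runLen c t with hR
      set rt := t.drop R with hrt
      simp only [hrun]
      by_cases h2 : (1 : Int) < 1 + (R : Int)
      · rw [if_pos h2]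
        have hRpos : 0 < R := by omega
        have hpre : (done ++ [c]).length = done.length + 1 := by simp
        have hlist : done ++ c :: rt = (done ++ [c]) ++ rt := by simp
        have hid := insertDigits_eq (PySem.Int.toStr (1 + (R : Int))).toList (done ++ [c]) rt done.length hpre
        rw [hlist, hid]
        have hassoc : (done ++ [c]) ++ (PySem.Int.toStr (1 + (R : Int))).toList.map (fun d => String.ofList [d]) ++ rt
            = ((done ++ [c]) ++ (PySem.Int.toStr (1 + (R : Int))).toList.map (fun d => String.ofList [d])) ++ rt := by
          simp
        rw [hassoc]
        have hlen2 : done.length + (PySem.Int.toStr (1 + (R : Int))).toList.length + 1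
            = ((done ++ [c]) ++ (PySem.Int.toStr (1 + (R : Int))).toList.map (fun d => String.ofList [d])).length := by
          simp
          omega
        rw [hlen2]
        have hrec := ih rt ((done ++ [c]) ++ (PySem.Int.toStr (1 + (R : Int))).toList.map (fun d => String.ofList [d]))
          (by
            have h1 : rt.length ≤ t.length := by rw [hrt]; simp
            simp at h
            omega)
        rw [hrec, encode_cons, ← hR, ← hrt, if_pos hRpos]
        simp [digitsLen, PySem.Int.toList_toStr]
        omega
      · rw [if_neg h2]
        have hR0 : R = 0 := by omega
        have hrt0 : rt = t := by rw [hrt, hR0]; simp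
        have hlist : done ++ c :: rt = (done ++ [c]) ++ t := by simp [hrt0]
        rw [hlist]
        have hlen : done.length + 1 = (done ++ [c]).length := by simp
        rw [hlen]
        have hrec := ih t (done ++ [c]) (by simp at h; omega)
        rw [hrec, encode_cons, ← hR, hR0, if_neg (by omega)]
        simp
        omega

-- ===== B-side characterisation =====

theorem altRun_drop (chars : List String) (ch : String) : ∀ (t : List String) (fuel read : Nat),
    chars.drop read = t → runLen ch t ≤ fuel →
    altRun fuel chars ch read = read + runLen ch t := by
  intro t
  induction t with
  | nil =>
    intro fuel read hd _
    have hge : chars.length ≤ read := List.drop_eq_nil_iff.mp hd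
    cases fuel with
    | zero => simp [altRun, runLen]
    | succ f =>
      rw [altRun, if_neg (by intro hc; omega)]
      simp [runLen]
  | cons x t ih =>
    intro fuel read hd hf
    have hx : chars[read]? = some x := by
      have h0 : (chars.drop read)[0]? = some x := by rw [hd]; rfl
      rw [List.getElem?_drop] at h0
      simpa using h0
    have hlt : read < chars.length := (List.getElem?_eq_some_iff.mp hx).1
    have hd' : chars.drop (read + 1) = t := by
      have hdd : (chars.drop read).drop 1 = chars.drop (read + 1) := by
        rw [List.drop_drop]
      rw [← hdd, hd]
      simp
    by_cases hxc : x = ch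
    · subst hxc
      have hrl : runLen x (x :: t) = 1 + runLen x t := by simp [runLen]
      cases fuel with
      | zero => rw [hrl] at hf; omega
      | succ f =>
        rw [altRun, if_pos ⟨hlt, hx⟩]
        rw [ih f (read + 1) hd' (by rw [hrl] at hf; omega)]
        rw [hrl]
        omega
    · cases fuel with
      | zero => simp [altRun, runLen, hxc]
      | succ f =>
        rw [altRun, if_neg ?_]
        · simp [runLen, hxc]
        · intro hc
          rcases hc with ⟨_, h2⟩
          rw [hx] at h2
          exact hxc (Option.some.inj h2)

theorem foldl_count (l : List Char) : ∀ w : Nat, l.foldl (fun w _ => w + 1) w = w + l.length := by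
  induction l with
  | nil => intro w; simp
  | cons a l ih => intro w; simp [List.foldl, ih]; omega

theorem altLoop_encode : ∀ (fuel : Nat) (chars : List String) (read write : Nat),
    chars.length - read ≤ fuel → altLoop fuel chars read write = write + encode (chars.drop read) := by
  intro fuel
  induction fuel with
  | zero =>
    intro chars read write h
    rw [List.drop_eq_nil_of_le (by omega)]
    simp [altLoop, encode_nil]
  | succ f ih =>
    intro chars read write h
    by_cases hr : read < chars.length
    · rw [altLoop, if_pos hr]
      have hch : chars[read]? = some chars[read] := List.getElem?_eq_getElem hr
      rw [hch]
      have hdrop : chars.drop read = chars[read] :: chars.drop (read + 1) := by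
        rw [List.getElem_cons_drop]
      dsimp only
      set ch := chars[read] with hchd
      set t := chars.drop (read + 1) with ht
      set R := runLen ch t with hR
      have hrun : altRun chars.length chars ch read = read + (1 + R) := by
        have hrl : runLen ch (ch :: t) = 1 + runLen ch t := by simp [runLen]
        rw [altRun_drop chars ch (ch :: t) chars.length read hdrop
          (by
            have h1 := runLen_le ch (ch :: t)
            have h2 : (ch :: t).length = t.length + 1 := by simp
            have h3 : t.length = chars.length - (read + 1) := by rw [ht]; simp
            omega)]
        rw [hrl, ← hR]
      rw [hrun]
      have hsimp : read + (1 + R) - read = 1 + R := by omega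
      rw [hsimp]
      have hbound : chars.length - (read + (1 + R)) ≤ f := by omega
      rw [ih chars (read + (1 + R)) _ hbound]
      have hdrop2 : chars.drop (read + (1 + R)) = t.drop R := by
        have hdd : chars.drop (read + (1 + R)) = (chars.drop (read + 1)).drop R := by
          rw [List.drop_drop]; ring_nf
        rw [hdd, ← ht]
      rw [hdrop2, hdrop, encode_cons, ← hR]
      by_cases hRp : 0 < R
      · rw [if_pos (by omega : 1 < 1 + R), if_pos hRp, foldl_count, digitsLen]
        omega
      · rw [if_neg (by omega : ¬ 1 < 1 + R), if_neg hRp]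
        omega
    · rw [altLoop, if_neg hr]
      rw [List.drop_eq_nil_of_le (by omega)]
      simp [encode_nil]

-- ===== VERDICT (by name: the statement is the Claim_ definition above) =====
theorem compress_spec : Claim_equal_compress := by
  intro chars _
  unfold Spec_compress compress compress_alt
  have hB : altLoop chars.length chars 0 0 = encode chars := by
    have := altLoop_encode chars.length chars 0 0 (by omega)
    simpa using this
  by_cases h1 : chars.length = 1
  · rw [if_pos h1]
    rcases List.length_eq_one_iff.mp h1 with ⟨c, rfl⟩
    rw [hB]
    rw [encode_cons]
    simp [runLen, encode_nil]
  · rw [if_neg h1, hB]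
    have := compressLoop_encode chars.length chars [] (le_refl _)
    simp only [List.nil_append, List.length_nil] at this
    rw [this]
    simp
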